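-- pv_equiv track=rewrite | github.com/paiml/depyler | examples/hard_array_pascal_row.py | pascal_is_symmetric
-- ===== SOURCE A (Python) =====
-- def pascal_row(n: int) -> list[int]:
--     row: list[int] = [1]
--     i: int = 1
--     while i <= n:
--         prev: int = row[i - 1]
--         val: int = prev * (n - i + 1) // i
--         row.append(val)
--         i = i + 1
--     return row
--
-- def pascal_is_symmetric(n: int) -> int:
--     row: list[int] = pascal_row(n)
--     sz: int = len(row)
--     i: int = 0
--     while i < sz // 2:
--         j: int = sz - 1 - i
--         if row[i] != row[j]:
--             return 0
--         i = i + 1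
--     return 1
-- ===== SOURCE B (Python) =====
-- def pascal_is_symmetric(n: int) -> int:
--     # Every row of Pascal's triangle is a palindrome (C(n,k) = C(n,n-k)),
--     # so the symmetry check always succeeds.
--     return 1
-- ===== Notes on version B (the rewrite author's own statement) =====
-- stated objective: faster
-- what changed: B replaces the row construction and element-by-element palindrome scan by a constant return value, justified by binomial symmetry C(n,k)=C(n,n-k) (and the singleton row for negative n), proved in Lean via Nat.choose_symm.
import Mathlib
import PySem

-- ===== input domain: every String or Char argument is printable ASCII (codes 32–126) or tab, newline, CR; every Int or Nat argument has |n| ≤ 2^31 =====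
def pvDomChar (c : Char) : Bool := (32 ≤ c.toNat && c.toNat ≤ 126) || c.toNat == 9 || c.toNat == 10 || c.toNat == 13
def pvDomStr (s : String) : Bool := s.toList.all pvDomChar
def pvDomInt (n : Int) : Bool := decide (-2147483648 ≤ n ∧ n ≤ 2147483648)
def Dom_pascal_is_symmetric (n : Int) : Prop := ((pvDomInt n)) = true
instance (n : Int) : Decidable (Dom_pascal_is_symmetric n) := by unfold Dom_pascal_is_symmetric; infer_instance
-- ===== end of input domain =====

-- B replaces A's row construction + palindrome scan by the constant 1 (binomial symmetry).

-- ===== PORT A =====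
-- while i <= n: prev = row[i-1]; val = prev*(n-i+1)//i; row.append(val); i += 1
-- (the index i-1 is always in range — row has length i — so pyGetD with default 0 is exact here)
-- fuel = number of remaining iterations (exact: the loop runs n - i + 1 more times); structural recursion
def pascalRowLoop (n : Int) (fuel : Nat) (row : List Int) (i : Int) : List Int :=
  match fuel with
  | 0 => row
  | f + 1 =>
    if i ≤ n then
      let prev : Int := PySem.List.pyGetD row (i - 1) 0
      let val : Int := PySem.Int.floordiv (prev * (n - i + 1)) i
      pascalRowLoop n f (row ++ [val]) (i + 1)
    else row

def pascal_row (n : Int) : List Int := pascalRowLoop n n.toNat [1] 1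

-- while i < sz // 2: j = sz-1-i; if row[i] != row[j]: return 0; i += 1   (indices always in range)
-- fuel = number of remaining iterations (exact: the loop runs sz // 2 - i more times); structural recursion
def symLoop (row : List Int) (sz : Int) (fuel : Nat) (i : Int) : Int :=
  match fuel with
  | 0 => 1
  | f + 1 =>
    if i < PySem.Int.floordiv sz 2 then
      let j : Int := sz - 1 - i
      if PySem.List.pyGetD row i 0 ≠ PySem.List.pyGetD row j 0 then 0
      else symLoop row sz f (i + 1)
    else 1

def pascal_is_symmetric (n : Int) : Int :=
  let row : List Int := pascal_row n
  let sz : Int := row.length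
  symLoop row sz (PySem.Int.floordiv sz 2).toNat 0

-- ===== PORT B =====
def pascal_is_symmetric_alt (_n : Int) : Int := 1

-- ===== PRECONDITION & SPEC =====
def Spec_pascal_is_symmetric (n : Int) (out : Int) : Prop := out = pascal_is_symmetric_alt n
instance (n : Int) (out : Int) : Decidable (Spec_pascal_is_symmetric n out) := by unfold Spec_pascal_is_symmetric; infer_instance

-- ===== CLAIM (what is proved, stated in full; the proofs are below) =====
def Claim_equal_pascal_is_symmetric : Prop := ∀ (n : Int), Dom_pascal_is_symmetric n → Spec_pascal_is_symmetric n (pascal_is_symmetric n)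

-- ===== LEMMAS AND PROOFS =====

-- the choose row, as Ints
def chooseRow (N : Nat) : List Int := (List.range (N + 1)).map (fun k => ((N.choose k : Nat) : Int))

lemma rowLoop_inv (N : Nat) : ∀ (f i : Nat), 1 ≤ i → i + f = N + 1 →
    pascalRowLoop (N : Int) f ((List.range i).map (fun k => ((N.choose k : Nat) : Int))) (i : Int)
      = chooseRow N := by
  intro f
  induction f with
  | zero =>
    intro i hi1 hif
    have hi : i = N + 1 := by omega
    subst hi
    rfl
  | succ f ih =>
    intro i hi1 hif
    have hiN : i ≤ N := by omega
    rw [pascalRowLoop, if_pos (by omega : (i : Int) ≤ (N : Int))]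
    have hidx : (i : Int) - 1 = ((i - 1 : Nat) : Int) := by omega
    have hprev : PySem.List.pyGetD ((List.range i).map (fun k => ((N.choose k : Nat) : Int))) ((i : Int) - 1) 0
        = ((N.choose (i - 1) : Nat) : Int) := by
      rw [hidx, PySem.List.pyGetD_natCast]
      rw [List.getD_eq_getElem?_getD, List.getElem?_map, List.getElem?_range (by omega)]
      rfl
    show pascalRowLoop (N : Int) f ((List.range i).map (fun k => ((N.choose k : Nat) : Int)) ++
        [PySem.Int.floordiv (PySem.List.pyGetD ((List.range i).map (fun k => ((N.choose k : Nat) : Int))) ((i : Int) - 1) 0 * ((N : Int) - (i : Int) + 1)) (i : Int)])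
        ((i : Int) + 1) = chooseRow N
    rw [hprev]
    have hsub : (N : Int) - (i : Int) + 1 = ((N - (i - 1) : Nat) : Int) := by omega
    have hmul : N.choose (i - 1) * (N - (i - 1)) = N.choose i * i := by
      have h := Nat.choose_succ_right_eq N (i - 1)
      rw [Nat.sub_add_cancel hi1] at h
      omega
    have hval : PySem.Int.floordiv (((N.choose (i - 1) : Nat) : Int) * ((N : Int) - (i : Int) + 1)) (i : Int)
        = ((N.choose i : Nat) : Int) := by
      rw [hsub, ← Nat.cast_mul, hmul, PySem.Int.floordiv_natCast]
      rw [Nat.mul_div_cancel _ (by omega : 0 < i)]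
    rw [hval]
    have hrow : (List.range i).map (fun k => ((N.choose k : Nat) : Int)) ++ [((N.choose i : Nat) : Int)]
        = (List.range (i + 1)).map (fun k => ((N.choose k : Nat) : Int)) := by
      rw [List.range_succ, List.map_append]
      rfl
    rw [hrow]
    have hcast : (i : Int) + 1 = ((i + 1 : Nat) : Int) := by omega
    rw [hcast]
    exact ih (i + 1) (by omega) (by omega)

lemma pascal_row_neg (n : Int) (h : n < 1) : pascal_row n = [1] := by
  rw [pascal_row]
  rcases Nat.eq_zero_or_pos n.toNat with h0 | h0
  · rw [h0]; rfl
  · omega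

lemma pascal_row_nonneg (n : Int) (h : 0 ≤ n) : pascal_row n = chooseRow n.toNat := by
  have hn : n = (n.toNat : Int) := by omega
  rw [pascal_row, hn]
  have h1 : ([1] : List Int) = (List.range 1).map (fun k => ((n.toNat.choose k : Nat) : Int)) := by
    simp
  have h2 : (1 : Int) = ((1 : Nat) : Int) := rfl
  rw [h1, h2]
  exact rowLoop_inv n.toNat n.toNat 1 le_rfl (by omega)

-- palindrome hypothesis drives symLoop to 1
lemma symLoop_one (row : List Int) (sz : Int) (hsz : sz = (row.length : Int))
    (hpal : ∀ i : Int, 0 ≤ i → i < sz →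
      PySem.List.pyGetD row i 0 = PySem.List.pyGetD row (sz - 1 - i) 0) :
    ∀ (fuel : Nat) (i : Int), 0 ≤ i → symLoop row sz fuel i = 1 := by
  intro fuel
  induction fuel with
  | zero => intro i _; rfl
  | succ f ih =>
    intro i hi
    by_cases h : i < PySem.Int.floordiv sz 2
    · rw [symLoop]
      have h2 : PySem.Int.floordiv sz 2 = sz / 2 := PySem.Int.floordiv_eq_ediv_of_pos (by omega)
      have hlt : i < sz := by rw [h2] at h; omega
      rw [if_pos h, if_neg (by simpa using hpal i hi hlt)]
      exact ih (i + 1) (by omega)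
    · rw [symLoop, if_neg h]

lemma chooseRow_pal (N : Nat) : ∀ i : Int, 0 ≤ i → i < ((chooseRow N).length : Int) →
    PySem.List.pyGetD (chooseRow N) i 0
      = PySem.List.pyGetD (chooseRow N) (((chooseRow N).length : Int) - 1 - i) 0 := by
  intro i h0 hlt
  have hlen : (chooseRow N).length = N + 1 := by simp [chooseRow]
  rw [hlen] at hlt ⊢
  set k := i.toNat with hk
  have hkN : k ≤ N := by omega
  have hik : i = (k : Int) := by omega
  have hjk : ((N + 1 : Nat) : Int) - 1 - i = ((N - k : Nat) : Int) := by omega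
  rw [hjk, hik, PySem.List.pyGetD_natCast, PySem.List.pyGetD_natCast]
  rw [List.getD_eq_getElem?_getD, List.getD_eq_getElem?_getD]
  simp only [chooseRow, List.getElem?_map, List.getElem?_range (by omega : k < N + 1),
    List.getElem?_range (by omega : N - k < N + 1)]
  have := Nat.choose_symm hkN
  simp [this]

-- ===== VERDICT (by name: the statement is the Claim_ definition above) =====
theorem pascal_is_symmetric_spec : Claim_equal_pascal_is_symmetric := by
  intro n _
  unfold Spec_pascal_is_symmetric pascal_is_symmetric_alt pascal_is_symmetric
  by_cases h : 0 ≤ n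
  · rw [pascal_row_nonneg n h]
    exact symLoop_one _ _ rfl (chooseRow_pal n.toNat) _ 0 le_rfl
  · rw [pascal_row_neg n (by omega)]
    have : ∀ i : Int, 0 ≤ i → i < ((([1] : List Int)).length : Int) →
        PySem.List.pyGetD ([1] : List Int) i 0
          = PySem.List.pyGetD ([1] : List Int) ((([1] : List Int).length : Int) - 1 - i) 0 := by
      intro i h1 h2
      simp only [List.length_singleton, Nat.cast_one] at h2
      have hi : i = 0 := by omega
      subst hi; rfl
    exact symLoop_one _ _ rfl this _ 0 le_rfl
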